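-- pv_equiv track=rewrite | github.com/ladyy27/pico-placa-predictor | pico_placa_predictor/pico_placa/services/service.py | isAllowedToBeOnRoad
-- ===== SOURCE A (Python) =====
-- def time_is_between(time, time_range):
--     if time_range[1] < time_range[0]:
--         return time >= time_range[0] or time <= time_range[1]
--     return time_range[0] <= time <= time_range[1]
--
-- def isAllowedToBeOnRoadAccordingTimes(time, range1, range2, range3, range4):
--     if time_is_between(time, (range1, range2)) or time_is_between(time, (range3, range4)):
--         return True
--     else:
--         return False
--
-- def isAllowedToBeOnRoadAccordingDay(lastPlateDigit, plateRangeStart, plateRangeEnd, currentDay, dayOfweek, timeBetweenTimes):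
--     if lastPlateDigit == plateRangeStart or lastPlateDigit == plateRangeEnd:
--         if currentDay == dayOfweek:
--             if timeBetweenTimes:
--                 canBeOnRoad = False
--             else:
--                 canBeOnRoad = True
--         else:
--             canBeOnRoad = True
--     else:
--         canBeOnRoad = True
--     return canBeOnRoad
--
-- def isAllowedToBeOnRoad(currentTime, lastPlateDigit, currentDay):
--
--     startTimeAM = "07:00:00"
--     endTimeAM = "09:30:00"
--     startTimePM = "16:00:00"
--     endTimePM = "19:30:00"
--
--     timeBetweenTimes = isAllowedToBeOnRoadAccordingTimes(currentTime, startTimeAM, endTimeAM, startTimePM, endTimePM)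
--     picoPlacaDays= []
--     picoPlacaDays.append(isAllowedToBeOnRoadAccordingDay(lastPlateDigit, 1, 2, currentDay, 0, timeBetweenTimes))
--     picoPlacaDays.append(isAllowedToBeOnRoadAccordingDay(lastPlateDigit, 3, 4, currentDay, 1, timeBetweenTimes))
--     picoPlacaDays.append(isAllowedToBeOnRoadAccordingDay(lastPlateDigit, 5, 6, currentDay, 2, timeBetweenTimes))
--     picoPlacaDays.append(isAllowedToBeOnRoadAccordingDay(lastPlateDigit, 7, 8, currentDay, 3, timeBetweenTimes))
--     picoPlacaDays.append(isAllowedToBeOnRoadAccordingDay(lastPlateDigit, 9, 0, currentDay, 4, timeBetweenTimes))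
--
--
--     if all(item == True for item in picoPlacaDays):
--         response = "Can be on the road"
--     else:
--         response = "Can not be on the road"
--     return response
-- ===== SOURCE B (Python) =====
-- SCHEDULE = [(0, {1, 2}), (1, {3, 4}), (2, {5, 6}), (3, {7, 8}), (4, {9, 0})]
--
-- def isAllowedToBeOnRoad(currentTime, lastPlateDigit, currentDay):
--     in_window = ("07:00:00" <= currentTime <= "09:30:00") or \
--                 ("16:00:00" <= currentTime <= "19:30:00")
--     blocked = False
--     for day, digits in SCHEDULE:
--         if day == currentDay:
--             blocked = lastPlateDigit in digits and in_window
--             break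
--     return "Can not be on the road" if blocked else "Can be on the road"
-- ===== Notes on version B (the rewrite author's own statement) =====
-- stated objective: simpler
-- what changed: Replaces the five hand-unrolled per-day helper calls collected into a list and checked with all(...) by a single data-driven scan of a (day, restricted-digits) schedule table that computes the blocked flag directly.
import Mathlib
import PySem

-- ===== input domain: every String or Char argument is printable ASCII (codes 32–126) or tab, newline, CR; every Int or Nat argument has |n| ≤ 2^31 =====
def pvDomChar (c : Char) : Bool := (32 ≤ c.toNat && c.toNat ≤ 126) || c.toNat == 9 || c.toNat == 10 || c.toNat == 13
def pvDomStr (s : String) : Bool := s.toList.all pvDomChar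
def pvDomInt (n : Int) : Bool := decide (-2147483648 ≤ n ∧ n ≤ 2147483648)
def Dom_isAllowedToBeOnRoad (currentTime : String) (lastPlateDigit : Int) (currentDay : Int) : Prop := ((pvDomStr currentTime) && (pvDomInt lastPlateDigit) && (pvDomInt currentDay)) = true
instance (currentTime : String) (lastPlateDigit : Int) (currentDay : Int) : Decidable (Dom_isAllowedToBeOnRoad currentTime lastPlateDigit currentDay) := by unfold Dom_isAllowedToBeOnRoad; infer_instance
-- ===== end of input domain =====

-- B replaces A's five hand-unrolled per-day helper calls collected into a list and tested with all(...)
-- by one scan of a (day, restricted-digits) schedule table computing the blocked flag directly (objective: simpler).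

-- Python string ≤ (code-point lexicographic: a < b or a = b), kernel-reducible; shared primitive for both ports
def pvStrLe (a b : String) : Bool := PySem.Chars.strLt a.toList b.toList || (a.toList == b.toList)

-- ===== PORT A =====
def pvTimeIsBetween (time : String) (timeRange : String × String) : Bool :=
  if PySem.Chars.strLt timeRange.2.toList timeRange.1.toList then
    pvStrLe timeRange.1 time || pvStrLe time timeRange.2
  else
    pvStrLe timeRange.1 time && pvStrLe time timeRange.2

def pvIsAllowedToBeOnRoadAccordingTimes (time r1 r2 r3 r4 : String) : Bool :=
  if pvTimeIsBetween time (r1, r2) || pvTimeIsBetween time (r3, r4) then true else false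

def pvIsAllowedToBeOnRoadAccordingDay (lastPlateDigit plateRangeStart plateRangeEnd currentDay dayOfweek : Int) (timeBetweenTimes : Bool) : Bool :=
  if lastPlateDigit = plateRangeStart ∨ lastPlateDigit = plateRangeEnd then
    if currentDay = dayOfweek then
      if timeBetweenTimes then false else true
    else true
  else true

def isAllowedToBeOnRoad (currentTime : String) (lastPlateDigit : Int) (currentDay : Int) : String :=
  let timeBetweenTimes := pvIsAllowedToBeOnRoadAccordingTimes currentTime "07:00:00" "09:30:00" "16:00:00" "19:30:00"
  let picoPlacaDays : List Bool :=
    [pvIsAllowedToBeOnRoadAccordingDay lastPlateDigit 1 2 currentDay 0 timeBetweenTimes,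
     pvIsAllowedToBeOnRoadAccordingDay lastPlateDigit 3 4 currentDay 1 timeBetweenTimes,
     pvIsAllowedToBeOnRoadAccordingDay lastPlateDigit 5 6 currentDay 2 timeBetweenTimes,
     pvIsAllowedToBeOnRoadAccordingDay lastPlateDigit 7 8 currentDay 3 timeBetweenTimes,
     pvIsAllowedToBeOnRoadAccordingDay lastPlateDigit 9 0 currentDay 4 timeBetweenTimes]
  if picoPlacaDays.all (fun item => item == true) then "Can be on the road" else "Can not be on the road"

-- ===== PORT B =====
def pvSchedule : List (Int × List Int) := [(0, [1, 2]), (1, [3, 4]), (2, [5, 6]), (3, [7, 8]), (4, [9, 0])]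

-- the for-loop of Source B: first schedule entry whose day equals currentDay decides the blocked flag
def pvBlockedScan (currentDay lastPlateDigit : Int) (inWindow : Bool) : List (Int × List Int) → Bool
  | [] => false
  | (day, digits) :: rest =>
      if day = currentDay then digits.contains lastPlateDigit && inWindow
      else pvBlockedScan currentDay lastPlateDigit inWindow rest

def isAllowedToBeOnRoad_alt (currentTime : String) (lastPlateDigit : Int) (currentDay : Int) : String :=
  let inWindow := (pvStrLe "07:00:00" currentTime && pvStrLe currentTime "09:30:00") ||
                  (pvStrLe "16:00:00" currentTime && pvStrLe currentTime "19:30:00")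
  if pvBlockedScan currentDay lastPlateDigit inWindow pvSchedule then "Can not be on the road" else "Can be on the road"

-- ===== PRECONDITION & SPEC =====
def Spec_isAllowedToBeOnRoad (currentTime : String) (lastPlateDigit : Int) (currentDay : Int) (out : String) : Prop := out = isAllowedToBeOnRoad_alt currentTime lastPlateDigit currentDay
instance (currentTime : String) (lastPlateDigit : Int) (currentDay : Int) (out : String) : Decidable (Spec_isAllowedToBeOnRoad currentTime lastPlateDigit currentDay out) := by unfold Spec_isAllowedToBeOnRoad; infer_instance

-- ===== CLAIM (what is proved, stated in full; the proofs are below) =====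
def Claim_equal_isAllowedToBeOnRoad : Prop := ∀ (currentTime : String) (lastPlateDigit : Int) (currentDay : Int), Dom_isAllowedToBeOnRoad currentTime lastPlateDigit currentDay → Spec_isAllowedToBeOnRoad currentTime lastPlateDigit currentDay (isAllowedToBeOnRoad currentTime lastPlateDigit currentDay)

-- ===== LEMMAS AND PROOFS =====

-- A's wrap-around branch never fires on the fixed ranges, so A's time flag is B's window flag
theorem pvTime_eq (t : String) :
    pvIsAllowedToBeOnRoadAccordingTimes t "07:00:00" "09:30:00" "16:00:00" "19:30:00" =
      ((pvStrLe "07:00:00" t && pvStrLe t "09:30:00") || (pvStrLe "16:00:00" t && pvStrLe t "19:30:00")) := by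
  have h1 : PySem.Chars.strLt "09:30:00".toList "07:00:00".toList = false := by decide
  have h2 : PySem.Chars.strLt "19:30:00".toList "16:00:00".toList = false := by decide
  simp only [pvIsAllowedToBeOnRoadAccordingTimes, pvTimeIsBetween]
  rw [h1, h2]
  simp

-- each per-day helper call, when the day matches its weekday, is the blocked test for that entry
theorem pvHit (tw : Bool) (d a b w : Int) :
    pvIsAllowedToBeOnRoadAccordingDay d a b w w tw = !((d == a || d == b) && tw) := by
  by_cases h : d = a ∨ d = b <;> cases tw <;> simp_all [pvIsAllowedToBeOnRoadAccordingDay] <;> tauto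

-- and when the day does not match, it is vacuously true
theorem pvMiss (tw : Bool) (d a b day w : Int) (h : day ≠ w) :
    pvIsAllowedToBeOnRoadAccordingDay d a b day w tw = true := by
  simp [pvIsAllowedToBeOnRoadAccordingDay, h]

-- the unrolled five-day check agrees with the schedule scan, for any window flag
theorem pvDay_eq (tw : Bool) (d day : Int) :
    ([pvIsAllowedToBeOnRoadAccordingDay d 1 2 day 0 tw,
      pvIsAllowedToBeOnRoadAccordingDay d 3 4 day 1 tw,
      pvIsAllowedToBeOnRoadAccordingDay d 5 6 day 2 tw,
      pvIsAllowedToBeOnRoadAccordingDay d 7 8 day 3 tw,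
      pvIsAllowedToBeOnRoadAccordingDay d 9 0 day 4 tw].all (fun item => item == true)) =
      !(pvBlockedScan day d tw pvSchedule) := by
  by_cases h0 : day = 0
  · subst h0; (simp [pvHit, pvMiss, pvBlockedScan, pvSchedule]; rfl)
  by_cases h1 : day = 1
  · subst h1; (simp [pvHit, pvMiss, pvBlockedScan, pvSchedule]; rfl)
  by_cases h2 : day = 2
  · subst h2; (simp [pvHit, pvMiss, pvBlockedScan, pvSchedule]; rfl)
  by_cases h3 : day = 3
  · subst h3; (simp [pvHit, pvMiss, pvBlockedScan, pvSchedule]; rfl)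
  by_cases h4 : day = 4
  · subst h4; (simp [pvHit, pvMiss, pvBlockedScan, pvSchedule]; rfl)
  simp [pvMiss tw d _ _ day _ h0, pvMiss tw d _ _ day _ h1, pvMiss tw d _ _ day _ h2,
    pvMiss tw d _ _ day _ h3, pvMiss tw d _ _ day _ h4, pvBlockedScan, pvSchedule,
    Ne.symm h0, Ne.symm h1, Ne.symm h2, Ne.symm h3, Ne.symm h4]

-- ===== VERDICT (by name: the statement is the Claim_ definition above) =====
theorem isAllowedToBeOnRoad_spec : Claim_equal_isAllowedToBeOnRoad := by
  intro t d day _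
  unfold Spec_isAllowedToBeOnRoad isAllowedToBeOnRoad isAllowedToBeOnRoad_alt
  simp only [pvTime_eq, pvDay_eq]
  cases pvBlockedScan day d (pvStrLe "07:00:00" t && pvStrLe t "09:30:00" || pvStrLe "16:00:00" t && pvStrLe t "19:30:00") pvSchedule <;> simp
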